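-- pv_equiv track=rewrite | github.com/jlake27-lgtm/RhymeScheme | app.py | are_similar_vowels
-- ===== SOURCE A (Python) =====
-- def are_similar_vowels(vowel1, vowel2):
--     """Check if two vowel sounds are similar enough for slant rhymes"""
--     similar_groups = [
--         {'IH', 'IY'},  # bit/beat
--         {'EH', 'AE'},  # bet/bat
--         {'AH', 'UH'},  # but/put
--         {'OW', 'AO'},  # boat/bought
--         {'AY', 'EY'},  # bite/bait
--         {'AW', 'OW'},  # bout/boat
--     ]
--
--     for group in similar_groups:
--         if vowel1 in group and vowel2 in group:
--             return True
--     return False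
-- ===== SOURCE B (Python) =====
-- def _build_index():
--     similar_groups = [
--         ['IH', 'IY'],  # bit/beat
--         ['EH', 'AE'],  # bet/bat
--         ['AH', 'UH'],  # but/put
--         ['OW', 'AO'],  # boat/bought
--         ['AY', 'EY'],  # bite/bait
--         ['AW', 'OW'],  # bout/boat
--     ]
--     idx = {}
--     for i, group in enumerate(similar_groups):
--         for v in group:
--             idx.setdefault(v, set()).add(i)
--     return idx
--
--
-- _VOWEL_INDEX = _build_index()
--
--
-- def are_similar_vowels(vowel1, vowel2):
--     """Check if two vowel sounds are similar enough for slant rhymes"""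
--     groups1 = _VOWEL_INDEX.get(vowel1, set())
--     groups2 = _VOWEL_INDEX.get(vowel2, set())
--     return bool(groups1 & groups2)
-- ===== Notes on version B (the rewrite author's own statement) =====
-- stated objective: idiomatic
-- what changed: Replaces A's per-call linear scan over the six groups with a module-level inverted index mapping each vowel to the set of group ids it belongs to; the call is then a single dict lookup per vowel plus one set-intersection test.
import Mathlib
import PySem

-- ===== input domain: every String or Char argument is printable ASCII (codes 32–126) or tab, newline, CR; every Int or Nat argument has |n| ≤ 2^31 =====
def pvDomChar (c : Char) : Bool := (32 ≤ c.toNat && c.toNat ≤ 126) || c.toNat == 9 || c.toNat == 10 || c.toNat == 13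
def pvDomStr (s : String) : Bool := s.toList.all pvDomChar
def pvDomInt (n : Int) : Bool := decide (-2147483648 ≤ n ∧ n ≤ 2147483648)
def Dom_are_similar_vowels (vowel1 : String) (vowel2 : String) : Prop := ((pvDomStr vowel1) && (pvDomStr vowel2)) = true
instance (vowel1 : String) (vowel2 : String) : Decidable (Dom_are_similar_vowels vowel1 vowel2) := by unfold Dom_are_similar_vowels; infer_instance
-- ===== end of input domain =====

-- B replaces A's per-call scan over the groups with a precomputed inverted index
-- (vowel -> set of group ids) and a single set-intersection test (objective: idiomatic).

-- ===== PORT A =====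
def asvGroups : List (PySem.Set String) :=
  [PySem.Set.ofList ["IH", "IY"], PySem.Set.ofList ["EH", "AE"], PySem.Set.ofList ["AH", "UH"],
   PySem.Set.ofList ["OW", "AO"], PySem.Set.ofList ["AY", "EY"], PySem.Set.ofList ["AW", "OW"]]

def asvLoop (vowel1 vowel2 : String) : List (PySem.Set String) → Bool
  | [] => false
  | g :: rest =>
      if PySem.Set.contains g vowel1 && PySem.Set.contains g vowel2 then true
      else asvLoop vowel1 vowel2 rest

def are_similar_vowels (vowel1 : String) (vowel2 : String) : Bool :=
  asvLoop vowel1 vowel2 asvGroups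

-- ===== PORT B =====
def bGroups : List (List String) :=
  [["IH", "IY"], ["EH", "AE"], ["AH", "UH"], ["OW", "AO"], ["AY", "EY"], ["AW", "OW"]]

-- for i, group in enumerate(similar_groups): for v in group: idx.setdefault(v, set()).add(i)
def buildIndex : PySem.Dict String (PySem.Set Int) :=
  (PySem.List.enumerate bGroups).foldl
    (fun d p => p.2.foldl (fun d v => d.modify v PySem.Set.empty (fun s => PySem.Set.add s p.1)) d)
    PySem.Dict.empty

def vowelIndex : PySem.Dict String (PySem.Set Int) := buildIndex

def are_similar_vowels_alt (vowel1 : String) (vowel2 : String) : Bool :=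
  let groups1 := vowelIndex.getD vowel1 PySem.Set.empty
  let groups2 := vowelIndex.getD vowel2 PySem.Set.empty
  !(PySem.Set.inter groups1 groups2).isEmpty

-- ===== PRECONDITION & SPEC =====
def Spec_are_similar_vowels (vowel1 : String) (vowel2 : String) (out : Bool) : Prop := out = are_similar_vowels_alt vowel1 vowel2
instance (vowel1 : String) (vowel2 : String) (out : Bool) : Decidable (Spec_are_similar_vowels vowel1 vowel2 out) := by unfold Spec_are_similar_vowels; infer_instance

-- ===== CLAIM (what is proved, stated in full; the proofs are below) =====
def Claim_equal_are_similar_vowels : Prop := ∀ (vowel1 : String) (vowel2 : String), Dom_are_similar_vowels vowel1 vowel2 → Spec_are_similar_vowels vowel1 vowel2 (are_similar_vowels vowel1 vowel2)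

-- ===== LEMMAS AND PROOFS =====

-- the vowels either program ever reacts to
def asvVocab : List String :=
  ["IH", "IY", "EH", "AE", "AH", "UH", "OW", "AO", "AY", "EY", "AW"]

lemma vowelIndex_eval :
    vowelIndex = PySem.Dict.mk
      [("IH", [0]), ("IY", [0]), ("EH", [1]), ("AE", [1]), ("AH", [2]), ("UH", [2]),
       ("OW", [3, 5]), ("AO", [3]), ("AY", [4]), ("EY", [4]), ("AW", [5])] := by
  decide

lemma asvLoop_false_left (v1 v2 : String) (gs : List (PySem.Set String))
    (h : ∀ g ∈ gs, PySem.Set.contains g v1 = false) : asvLoop v1 v2 gs = false := by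
  induction gs with
  | nil => rfl
  | cons g rest ih =>
      have hg : v1 ∉ g := by simpa using h g (List.mem_cons_self ..)
      simp [asvLoop, hg, ih (fun g hg => h g (List.mem_cons_of_mem _ hg))]

lemma asvLoop_false_right (v1 v2 : String) (gs : List (PySem.Set String))
    (h : ∀ g ∈ gs, PySem.Set.contains g v2 = false) : asvLoop v1 v2 gs = false := by
  induction gs with
  | nil => rfl
  | cons g rest ih =>
      have hg : v2 ∉ g := by simpa using h g (List.mem_cons_self ..)
      simp [asvLoop, hg, ih (fun g hg => h g (List.mem_cons_of_mem _ hg))]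

lemma A_false_left (v1 v2 : String) (h : v1 ∉ asvVocab) :
    are_similar_vowels v1 v2 = false := by
  simp only [asvVocab, List.mem_cons, List.not_mem_nil, or_false, not_or] at h
  obtain ⟨h1, h2, h3, h4, h5, h6, h7, h8, h9, h10, h11⟩ := h
  refine asvLoop_false_left v1 v2 asvGroups ?_
  intro g hg
  fin_cases hg <;>
    simp [PySem.Set.contains, PySem.Set.ofList, h1, h2, h3, h4, h5, h6, h7, h8, h9, h10, h11]

lemma A_false_right (v1 v2 : String) (h : v2 ∉ asvVocab) :
    are_similar_vowels v1 v2 = false := by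
  simp only [asvVocab, List.mem_cons, List.not_mem_nil, or_false, not_or] at h
  obtain ⟨h1, h2, h3, h4, h5, h6, h7, h8, h9, h10, h11⟩ := h
  refine asvLoop_false_right v1 v2 asvGroups ?_
  intro g hg
  fin_cases hg <;>
    simp [PySem.Set.contains, PySem.Set.ofList, h1, h2, h3, h4, h5, h6, h7, h8, h9, h10, h11]

lemma B_false_left (v1 v2 : String) (h : v1 ∉ asvVocab) :
    are_similar_vowels_alt v1 v2 = false := by
  simp only [asvVocab, List.mem_cons, List.not_mem_nil, or_false, not_or] at h
  obtain ⟨h1, h2, h3, h4, h5, h6, h7, h8, h9, h10, h11⟩ := h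
  simp [are_similar_vowels_alt, vowelIndex_eval, PySem.Dict.getD, PySem.Dict.get?, PySem.Set.inter, Ne.symm h1, Ne.symm h2, Ne.symm h3, Ne.symm h4,
    Ne.symm h5, Ne.symm h6, Ne.symm h7, Ne.symm h8, Ne.symm h9, Ne.symm h10, Ne.symm h11]

lemma B_false_right (v1 v2 : String) (h : v2 ∉ asvVocab) :
    are_similar_vowels_alt v1 v2 = false := by
  simp only [asvVocab, List.mem_cons, List.not_mem_nil, or_false, not_or] at h
  obtain ⟨h1, h2, h3, h4, h5, h6, h7, h8, h9, h10, h11⟩ := h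
  simp [are_similar_vowels_alt, vowelIndex_eval, PySem.Dict.getD, PySem.Dict.get?, PySem.Set.inter, Ne.symm h1, Ne.symm h2, Ne.symm h3, Ne.symm h4,
    Ne.symm h5, Ne.symm h6, Ne.symm h7, Ne.symm h8, Ne.symm h9, Ne.symm h10, Ne.symm h11]

-- ===== VERDICT (by name: the statement is the Claim_ definition above) =====
theorem are_similar_vowels_spec : Claim_equal_are_similar_vowels := by
  intro v1 v2 _
  unfold Spec_are_similar_vowels
  by_cases hv1 : v1 ∈ asvVocab
  · by_cases hv2 : v2 ∈ asvVocab
    · fin_cases hv1 <;> fin_cases hv2 <;> decide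
    · rw [A_false_right v1 v2 hv2, B_false_right v1 v2 hv2]
  · rw [A_false_left v1 v2 hv1, B_false_left v1 v2 hv1]
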